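-- pv_equiv track=rewrite | github.com/PolychronMidi/Polychron | tools/HME/service/server/coherence_timeseries.py | _parse_result_line
-- ===== SOURCE A (Python) =====
-- def _parse_result_line(line: str) -> tuple[str, str, str]:
--     """Parse a selftest result string like 'PASS: daemon uniqueness -- detail'
--     into (status, name, detail). Returns ('UNKNOWN', line, '') for unrecognized."""
--     line = line.strip()
--     for status in ("PASS", "FAIL", "WARN", "INFO", "NEW", "ERR"):
--         prefix = status + ":"
--         if line.startswith(prefix):
--             remainder = line[len(prefix):].strip()
--             if " -- " in remainder:
--                 name, detail = remainder.split(" -- ", 1)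
--                 return status, name.strip(), detail.strip()
--             return status, remainder, ""
--     return "UNKNOWN", line, ""
-- ===== SOURCE B (Python) =====
-- # Trie-driven recognizer: the six status prefixes are compiled once into a
-- # character-trie (flat edge table); the line is then scanned char by char
-- # through the trie instead of testing six candidate prefixes.
--
-- _EDGES = {}   # (node, char) -> node
-- _ACCEPT = {}  # node -> status (reached exactly after consuming "<STATUS>:")
--
-- def _build():
--     next_id = 1
--     for st in ("PASS", "FAIL", "WARN", "INFO", "NEW", "ERR"):
--         node = 0
--         for ch in st + ":":
--             key = (node, ch)
--             if key not in _EDGES: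
--                 _EDGES[key] = next_id
--                 next_id += 1
--             node = _EDGES[key]
--         _ACCEPT[node] = st
--
-- _build()
--
-- def _parse_result_line(line: str) -> tuple[str, str, str]:
--     """Parse a selftest result string like 'PASS: daemon uniqueness -- detail'
--     into (status, name, detail). Returns ('UNKNOWN', line, '') for unrecognized."""
--     s = line.strip()
--     node, i, status = 0, 0, None
--     while status is None and i < len(s) and (node, s[i]) in _EDGES:
--         node = _EDGES[(node, s[i])]
--         i += 1
--         status = _ACCEPT.get(node)
--     if status is None:
--         return "UNKNOWN", s, ""
--     rest = s[i:].strip()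
--     j = rest.find(" -- ")
--     if j < 0:
--         return status, rest, ""
--     return status, rest[:j].strip(), rest[j + 4:].strip()
-- ===== Notes on version B (the rewrite author's own statement) =====
-- stated objective: alternative
-- what changed: Replaces A's loop of six startswith prefix tests with a character-trie: the six statuses are compiled once into a flat edge table ((node,char)->node plus accepting nodes), the line is walked through it char by char, and the name/detail split uses a single find of the name/detail separator with slicing instead of a guarded membership-test-then-split.
import Mathlib
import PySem

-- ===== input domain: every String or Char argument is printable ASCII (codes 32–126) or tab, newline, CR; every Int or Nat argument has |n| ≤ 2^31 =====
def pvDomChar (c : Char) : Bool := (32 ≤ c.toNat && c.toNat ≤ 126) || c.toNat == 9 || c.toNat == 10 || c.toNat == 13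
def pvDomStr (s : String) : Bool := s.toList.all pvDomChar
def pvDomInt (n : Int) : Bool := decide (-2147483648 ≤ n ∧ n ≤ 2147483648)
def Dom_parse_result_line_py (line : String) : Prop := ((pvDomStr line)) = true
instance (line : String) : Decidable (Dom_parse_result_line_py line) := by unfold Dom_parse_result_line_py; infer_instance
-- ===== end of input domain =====

-- B replaces A's six-candidate startswith scan by a character-trie (flat edge table built
-- once from the six statuses) walked over the line char by char (objective: alternative).

-- ===== PORT A =====
-- the status tuple A iterates over
def pvStatuses : List (List Char) := ["PASS".toList, "FAIL".toList, "WARN".toList, "INFO".toList, "NEW".toList, "ERR".toList]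

-- A's for-loop over candidate statuses, with its early returns
def pvAGo (s : List Char) : List (List Char) → String × String × String
  | [] => ("UNKNOWN", String.ofList s, "")
  | st :: rest =>
    let pre := st ++ [':']
    if PySem.Chars.startswith s pre then
      let remainder := PySem.Chars.strip (PySem.Chars.slice s (some (pre.length : Int)) none)
      if PySem.Chars.isIn " -- ".toList remainder then
        let parts := PySem.Chars.splitOnMax remainder " -- ".toList 1
        (String.ofList st, String.ofList (PySem.Chars.strip (parts.getD 0 [])),
         String.ofList (PySem.Chars.strip (parts.getD 1 [])))
      else
        (String.ofList st, String.ofList remainder, "")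
    else pvAGo s rest

def parse_result_line_py (line : String) : String × String × String :=
  pvAGo (PySem.Chars.strip line.toList) pvStatuses

-- ===== PORT B =====
-- Source B's _build(): compile the six statuses into a trie held as a flat edge table
-- _EDGES : (node, char) -> node and an accepting-node table _ACCEPT : node -> status
def pvBuild : PySem.Dict (Nat × Char) Nat × PySem.Dict Nat String × Nat :=
  ["PASS", "FAIL", "WARN", "INFO", "NEW", "ERR"].foldl
    (fun acc st =>
      let inner := (st.toList ++ [':']).foldl
        (fun (t : PySem.Dict (Nat × Char) Nat × Nat × Nat) ch =>
          match t.1.get? (t.2.1, ch) with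
          | some n => (t.1, n, t.2.2)
          | none => (t.1.insert (t.2.1, ch) t.2.2, t.2.2, t.2.2 + 1))
        (acc.1, 0, acc.2.2)
      (inner.1, acc.2.1.insert inner.2.1 st, inner.2.2))
    (PySem.Dict.empty, PySem.Dict.empty, 1)

def pvEdges : PySem.Dict (Nat × Char) Nat := pvBuild.1
def pvAccept : PySem.Dict Nat String := pvBuild.2.1

-- Source B's while loop: walk the trie from `node`, one character at a time, until an
-- accepting node is reached (some (status, rest of the input)) or the walk gets stuck
def pvWalk : Nat → List Char → Option (String × List Char)
  | _, [] => none
  | node, c :: t =>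
    match pvEdges.get? (node, c) with
    | none => none
    | some n =>
      match pvAccept.get? n with
      | some st => some (st, t)
      | none => pvWalk n t

def pvParse (s : List Char) : String × String × String :=
  match pvWalk 0 s with
  | none => ("UNKNOWN", String.ofList s, "")
  | some (st, tail) =>
    let rest := PySem.Chars.strip tail
    let j := PySem.Chars.find rest " -- ".toList
    if j < 0 then (st, String.ofList rest, "")
    else (st, String.ofList (PySem.Chars.strip (rest.take j.toNat)),
              String.ofList (PySem.Chars.strip (rest.drop (j.toNat + 4))))

def parse_result_line_py_alt (line : String) : String × String × String :=
  pvParse (PySem.Chars.strip line.toList)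

-- ===== PRECONDITION & SPEC =====
def Spec_parse_result_line_py (line : String) (out : String × String × String) : Prop := out = parse_result_line_py_alt line
instance (line : String) (out : String × String × String) : Decidable (Spec_parse_result_line_py line out) := by unfold Spec_parse_result_line_py; infer_instance

-- ===== CLAIM (what is proved, stated in full; the proofs are below) =====
def Claim_equal_parse_result_line_py : Prop := ∀ (line : String), Dom_parse_result_line_py line → Spec_parse_result_line_py line (parse_result_line_py line)

-- ===== LEMMAS AND PROOFS =====

-- the trie the build loop produces, written out
theorem pvEdges_lit : pvEdges = PySem.Dict.mk [((0, 'P'), 1), ((1, 'A'), 2), ((2, 'S'), 3), ((3, 'S'), 4), ((4, ':'), 5), ((0, 'F'), 6), ((6, 'A'), 7), ((7, 'I'), 8), ((8, 'L'), 9), ((9, ':'), 10), ((0, 'W'), 11), ((11, 'A'), 12), ((12, 'R'), 13), ((13, 'N'), 14), ((14, ':'), 15), ((0, 'I'), 16), ((16, 'N'), 17), ((17, 'F'), 18), ((18, 'O'), 19), ((19, ':'), 20), ((0, 'N'), 21), ((21, 'E'), 22), ((22, 'W'), 23), ((23, ':'), 24), ((0, 'E'), 25), ((25, 'R'), 26),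 ((26, 'R'), 27), ((27, ':'), 28)] := by rfl

theorem pvE0 (c : Char) : pvEdges.get? (0, c) = if c = 'P' then some 1 else if c = 'F' then some 6 else if c = 'W' then some 11 else if c = 'I' then some 16 else if c = 'N' then some 21 else if c = 'E' then some 25 else none := by
  by_cases h1 : c = 'P'; · subst h1; rfl
  by_cases h2 : c = 'F'; · subst h2; rfl
  by_cases h3 : c = 'W'; · subst h3; rfl
  by_cases h4 : c = 'I'; · subst h4; rfl
  by_cases h5 : c = 'N'; · subst h5; rfl
  by_cases h6 : c = 'E'; · subst h6; rfl
  rw [pvEdges_lit]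
  simp [PySem.Dict.get?, h1, h2, h3, h4, h5, h6, Ne.symm h1, Ne.symm h2, Ne.symm h3, Ne.symm h4, Ne.symm h5, Ne.symm h6]

theorem pvE1 (c : Char) : pvEdges.get? (1, c) = if c = 'A' then some 2 else none := by
  by_cases h : c = 'A'
  · subst h; rfl
  · rw [pvEdges_lit]; simp [PySem.Dict.get?, h, Ne.symm h]

theorem pvE2 (c : Char) : pvEdges.get? (2, c) = if c = 'S' then some 3 else none := by
  by_cases h : c = 'S'
  · subst h; rfl
  · rw [pvEdges_lit]; simp [PySem.Dict.get?, h, Ne.symm h]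

theorem pvE3 (c : Char) : pvEdges.get? (3, c) = if c = 'S' then some 4 else none := by
  by_cases h : c = 'S'
  · subst h; rfl
  · rw [pvEdges_lit]; simp [PySem.Dict.get?, h, Ne.symm h]

theorem pvE4 (c : Char) : pvEdges.get? (4, c) = if c = ':' then some 5 else none := by
  by_cases h : c = ':'
  · subst h; rfl
  · rw [pvEdges_lit]; simp [PySem.Dict.get?, h, Ne.symm h]

theorem pvE6 (c : Char) : pvEdges.get? (6, c) = if c = 'A' then some 7 else none := by
  by_cases h : c = 'A'
  · subst h; rfl
  · rw [pvEdges_lit]; simp [PySem.Dict.get?, h, Ne.symm h]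

theorem pvE7 (c : Char) : pvEdges.get? (7, c) = if c = 'I' then some 8 else none := by
  by_cases h : c = 'I'
  · subst h; rfl
  · rw [pvEdges_lit]; simp [PySem.Dict.get?, h, Ne.symm h]

theorem pvE8 (c : Char) : pvEdges.get? (8, c) = if c = 'L' then some 9 else none := by
  by_cases h : c = 'L'
  · subst h; rfl
  · rw [pvEdges_lit]; simp [PySem.Dict.get?, h, Ne.symm h]

theorem pvE9 (c : Char) : pvEdges.get? (9, c) = if c = ':' then some 10 else none := by
  by_cases h : c = ':'
  · subst h; rfl
  · rw [pvEdges_lit]; simp [PySem.Dict.get?, h, Ne.symm h]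

theorem pvE11 (c : Char) : pvEdges.get? (11, c) = if c = 'A' then some 12 else none := by
  by_cases h : c = 'A'
  · subst h; rfl
  · rw [pvEdges_lit]; simp [PySem.Dict.get?, h, Ne.symm h]

theorem pvE12 (c : Char) : pvEdges.get? (12, c) = if c = 'R' then some 13 else none := by
  by_cases h : c = 'R'
  · subst h; rfl
  · rw [pvEdges_lit]; simp [PySem.Dict.get?, h, Ne.symm h]

theorem pvE13 (c : Char) : pvEdges.get? (13, c) = if c = 'N' then some 14 else none := by
  by_cases h : c = 'N'
  · subst h; rfl
  · rw [pvEdges_lit]; simp [PySem.Dict.get?, h, Ne.symm h]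

theorem pvE14 (c : Char) : pvEdges.get? (14, c) = if c = ':' then some 15 else none := by
  by_cases h : c = ':'
  · subst h; rfl
  · rw [pvEdges_lit]; simp [PySem.Dict.get?, h, Ne.symm h]

theorem pvE16 (c : Char) : pvEdges.get? (16, c) = if c = 'N' then some 17 else none := by
  by_cases h : c = 'N'
  · subst h; rfl
  · rw [pvEdges_lit]; simp [PySem.Dict.get?, h, Ne.symm h]

theorem pvE17 (c : Char) : pvEdges.get? (17, c) = if c = 'F' then some 18 else none := by
  by_cases h : c = 'F'
  · subst h; rfl
  · rw [pvEdges_lit]; simp [PySem.Dict.get?, h, Ne.symm h]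

theorem pvE18 (c : Char) : pvEdges.get? (18, c) = if c = 'O' then some 19 else none := by
  by_cases h : c = 'O'
  · subst h; rfl
  · rw [pvEdges_lit]; simp [PySem.Dict.get?, h, Ne.symm h]

theorem pvE19 (c : Char) : pvEdges.get? (19, c) = if c = ':' then some 20 else none := by
  by_cases h : c = ':'
  · subst h; rfl
  · rw [pvEdges_lit]; simp [PySem.Dict.get?, h, Ne.symm h]

theorem pvE21 (c : Char) : pvEdges.get? (21, c) = if c = 'E' then some 22 else none := by
  by_cases h : c = 'E'
  · subst h; rfl
  · rw [pvEdges_lit]; simp [PySem.Dict.get?, h, Ne.symm h]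

theorem pvE22 (c : Char) : pvEdges.get? (22, c) = if c = 'W' then some 23 else none := by
  by_cases h : c = 'W'
  · subst h; rfl
  · rw [pvEdges_lit]; simp [PySem.Dict.get?, h, Ne.symm h]

theorem pvE23 (c : Char) : pvEdges.get? (23, c) = if c = ':' then some 24 else none := by
  by_cases h : c = ':'
  · subst h; rfl
  · rw [pvEdges_lit]; simp [PySem.Dict.get?, h, Ne.symm h]

theorem pvE25 (c : Char) : pvEdges.get? (25, c) = if c = 'R' then some 26 else none := by
  by_cases h : c = 'R'
  · subst h; rfl
  · rw [pvEdges_lit]; simp [PySem.Dict.get?, h, Ne.symm h]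

theorem pvE26 (c : Char) : pvEdges.get? (26, c) = if c = 'R' then some 27 else none := by
  by_cases h : c = 'R'
  · subst h; rfl
  · rw [pvEdges_lit]; simp [PySem.Dict.get?, h, Ne.symm h]

theorem pvE27 (c : Char) : pvEdges.get? (27, c) = if c = ':' then some 28 else none := by
  by_cases h : c = ':'
  · subst h; rfl
  · rw [pvEdges_lit]; simp [PySem.Dict.get?, h, Ne.symm h]


-- a straight chain in the trie: from node n, the word w must be read, ending in a node
-- accepting st; every intermediate node has exactly one outgoing edge
inductive pvChain : Nat → List Char → String → Prop
  | last {n n' : Nat} {ch : Char} {st : String}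
      (he : ∀ c, pvEdges.get? (n, c) = if c = ch then some n' else none)
      (ha : pvAccept.get? n' = some st) : pvChain n [ch] st
  | step {n n' : Nat} {ch : Char} {w : List Char} {st : String}
      (he : ∀ c, pvEdges.get? (n, c) = if c = ch then some n' else none)
      (ha : pvAccept.get? n' = none) (hc : pvChain n' w st) : pvChain n (ch :: w) st

theorem pv_word {n : Nat} {w : List Char} {st : String} (h : pvChain n w st) :
    ∀ s, pvWalk n s = if w <+: s then some (st, s.drop w.length) else none := by
  induction h with
  | @last n n' ch st he ha =>
    intro s
    rcases s with _ | ⟨c, t⟩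
    · simp [pvWalk]
    · by_cases hc : c = ch
      · subst hc
        simp [pvWalk, he c, ha, List.cons_prefix_cons]
      · simp [pvWalk, he c, List.cons_prefix_cons, hc, Ne.symm hc]
  | @step n n' ch w st he ha hc ih =>
    intro s
    rcases s with _ | ⟨c, t⟩
    · simp [pvWalk]
    · by_cases hcc : c = ch
      · subst hcc
        simp [pvWalk, he c, ha, ih t, List.cons_prefix_cons]
      · simp [pvWalk, he c, List.cons_prefix_cons, hcc, Ne.symm hcc]

theorem pvChainPASS : pvChain 1 "ASS:".toList "PASS" :=
  .step pvE1 rfl (.step pvE2 rfl (.step pvE3 rfl (.last pvE4 rfl)))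

theorem pvChainFAIL : pvChain 6 "AIL:".toList "FAIL" :=
  .step pvE6 rfl (.step pvE7 rfl (.step pvE8 rfl (.last pvE9 rfl)))

theorem pvChainWARN : pvChain 11 "ARN:".toList "WARN" :=
  .step pvE11 rfl (.step pvE12 rfl (.step pvE13 rfl (.last pvE14 rfl)))

theorem pvChainINFO : pvChain 16 "NFO:".toList "INFO" :=
  .step pvE16 rfl (.step pvE17 rfl (.step pvE18 rfl (.last pvE19 rfl)))

theorem pvChainNEW : pvChain 21 "EW:".toList "NEW" :=
  .step pvE21 rfl (.step pvE22 rfl (.last pvE23 rfl))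

theorem pvChainERR : pvChain 25 "RR:".toList "ERR" :=
  .step pvE25 rfl (.step pvE26 rfl (.last pvE27 rfl))

theorem pvAcc1 : pvAccept.get? 1 = none := rfl
theorem pvAcc6 : pvAccept.get? 6 = none := rfl
theorem pvAcc11 : pvAccept.get? 11 = none := rfl
theorem pvAcc16 : pvAccept.get? 16 = none := rfl
theorem pvAcc21 : pvAccept.get? 21 = none := rfl
theorem pvAcc25 : pvAccept.get? 25 = none := rfl

-- the root: first character selects the status chain
theorem pv_walk0 (s : List Char) :
    pvWalk 0 s =
      if ("PASS".toList ++ [':']) <+: s then some ("PASS", s.drop 5)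
      else if ("FAIL".toList ++ [':']) <+: s then some ("FAIL", s.drop 5)
      else if ("WARN".toList ++ [':']) <+: s then some ("WARN", s.drop 5)
      else if ("INFO".toList ++ [':']) <+: s then some ("INFO", s.drop 5)
      else if ("NEW".toList ++ [':']) <+: s then some ("NEW", s.drop 4)
      else if ("ERR".toList ++ [':']) <+: s then some ("ERR", s.drop 4)
      else none := by
  rcases s with _ | ⟨c, t⟩
  · simp [pvWalk]
  · by_cases h1 : c = 'P'
    · subst h1
      simp [pvWalk, pvE0, pvAcc1, pv_word pvChainPASS t, List.cons_prefix_cons]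
    by_cases h2 : c = 'F'
    · subst h2
      simp [pvWalk, pvE0, pvAcc6, pv_word pvChainFAIL t, List.cons_prefix_cons, h1]
    by_cases h3 : c = 'W'
    · subst h3
      simp [pvWalk, pvE0, pvAcc11, pv_word pvChainWARN t, List.cons_prefix_cons, h1, h2]
    by_cases h4 : c = 'I'
    · subst h4
      simp [pvWalk, pvE0, pvAcc16, pv_word pvChainINFO t, List.cons_prefix_cons, h1, h2, h3]
    by_cases h5 : c = 'N'
    · subst h5
      simp [pvWalk, pvE0, pvAcc21, pv_word pvChainNEW t, List.cons_prefix_cons, h1, h2, h3, h4]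
    by_cases h6 : c = 'E'
    · subst h6
      simp [pvWalk, pvE0, pvAcc25, pv_word pvChainERR t, List.cons_prefix_cons, h1, h2, h3, h4, h5]
    simp [pvWalk, pvE0, h1, h2, h3, h4, h5, h6, Ne.symm h1, Ne.symm h2, Ne.symm h3, Ne.symm h4, Ne.symm h5, Ne.symm h6, List.cons_prefix_cons]

theorem pv_go_m0 (sep : List Char) (fuel : Nat) (l cur : List Char) (acc : List (List Char)) :
    PySem.Chars.splitOnMax.go sep fuel 0 l cur acc = acc.reverse ++ [cur.reverse ++ l] := by
  cases fuel with
  | zero => simp [PySem.Chars.splitOnMax.go]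
  | succ f => cases l with
    | nil => simp [PySem.Chars.splitOnMax.go]
    | cons c rest => simp [PySem.Chars.splitOnMax.go]

theorem pv_go_found (sep : List Char) (hsep : sep ≠ []) :
    ∀ (i : Nat) (l : List Char) (fuel : Nat) (cur : List Char) (acc : List (List Char)),
      l.length < fuel → sep <+: l.drop i → (∀ j < i, ¬ sep <+: l.drop j) →
      PySem.Chars.splitOnMax.go sep fuel 1 l cur acc
        = acc.reverse ++ [cur.reverse ++ l.take i, l.drop (i + sep.length)] := by
  intro i
  induction i with
  | zero =>
    intro l fuel cur acc hfuel hp hmin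
    simp only [List.drop_zero] at hp
    have hl : l ≠ [] := by
      rcases hp with ⟨t, ht⟩
      intro h; subst h
      simp at ht
      exact hsep ht.1
    rcases l with _ | ⟨c, rest⟩
    · exact absurd rfl hl
    rcases fuel with _ | f
    · omega
    have hpref : sep.isPrefixOf (c :: rest) = true := by
      rw [List.isPrefixOf_iff_prefix]; exact hp
    simp only [PySem.Chars.splitOnMax.go, hpref, if_pos, if_neg (by omega : ¬ (1:Nat) = 0)]
    rw [pv_go_m0]
    simp
  | succ i ih =>
    intro l fuel cur acc hfuel hp hmin
    have hl : l ≠ [] := by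
      intro h; subst h
      simp at hp
      exact hsep hp
    rcases l with _ | ⟨c, rest⟩
    · exact absurd rfl hl
    rcases fuel with _ | f
    · omega
    have hnp : sep.isPrefixOf (c :: rest) = false := by
      rw [Bool.eq_false_iff]
      intro h
      exact hmin 0 (by omega) (by simpa using List.isPrefixOf_iff_prefix.mp h)
    simp only [PySem.Chars.splitOnMax.go, hnp, if_neg (by omega : ¬ (1:Nat) = 0)]
    rw [ih rest f (c :: cur) acc (by simpa using Nat.lt_of_succ_lt_succ hfuel)
      (by simpa using hp) (fun j hj => by simpa using hmin (j+1) (by omega))]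
    simp [List.take_succ_cons, Nat.add_right_comm]

theorem pv_splitOnMax_found (sep r : List Char) (hsep : sep ≠ []) (h : 0 ≤ PySem.Chars.find r sep) :
    PySem.Chars.splitOnMax r sep 1
      = [r.take (PySem.Chars.find r sep).toNat, r.drop ((PySem.Chars.find r sep).toNat + sep.length)] := by
  obtain ⟨h1, h2⟩ := PySem.Chars.find_spec (s := r) (sub := sep) h
  rw [PySem.Chars.splitOnMax, if_neg (by omega), show (1:Int).toNat = 1 from rfl]
  rw [pv_go_found sep hsep _ r (r.length + 1) [] [] (by omega) h1 h2]
  simp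

-- after the status is recognized, A's guarded split and B's find-based slicing agree
theorem pv_payload (st : String) (r : List Char) :
    (if PySem.Chars.isIn " -- ".toList r then
        (st, String.ofList (PySem.Chars.strip ((PySem.Chars.splitOnMax r " -- ".toList 1).getD 0 [])),
             String.ofList (PySem.Chars.strip ((PySem.Chars.splitOnMax r " -- ".toList 1).getD 1 [])))
     else (st, String.ofList r, ""))
    = (if PySem.Chars.find r " -- ".toList < 0 then (st, String.ofList r, "")
       else (st, String.ofList (PySem.Chars.strip (r.take (PySem.Chars.find r " -- ".toList).toNat)),
                 String.ofList (PySem.Chars.strip (r.drop ((PySem.Chars.find r " -- ".toList).toNat + 4))))) := by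
  have hlit : " -- ".toList = ([' ', '-', '-', ' '] : List Char) := rfl
  rw [hlit]
  by_cases hf : PySem.Chars.find r [' ', '-', '-', ' '] = -1
  · rw [if_neg (by simp [PySem.Chars.isIn, hf]), if_pos (by rw [hf]; norm_num)]
  · have h0 : 0 ≤ PySem.Chars.find r [' ', '-', '-', ' '] := by
      have := PySem.Chars.neg_one_le_find r [' ', '-', '-', ' ']
      omega
    rw [if_pos (by simp [PySem.Chars.isIn, hf]), if_neg (by omega)]
    rw [pv_splitOnMax_found _ _ (by decide) h0]
    simp

-- one hit of A's loop equals B's find-based payload on the same remainder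
theorem pv_hit (s st : List Char) (rest : List (List Char))
    (hT : PySem.Chars.startswith s (st ++ [':']) = true) :
    pvAGo s (st :: rest) =
      (if PySem.Chars.find (PySem.Chars.strip (s.drop (st.length + 1))) " -- ".toList < 0 then
        (String.ofList st, String.ofList (PySem.Chars.strip (s.drop (st.length + 1))), "")
       else
        (String.ofList st,
         String.ofList (PySem.Chars.strip ((PySem.Chars.strip (s.drop (st.length + 1))).take
           (PySem.Chars.find (PySem.Chars.strip (s.drop (st.length + 1))) " -- ".toList).toNat)),
         String.ofList (PySem.Chars.strip ((PySem.Chars.strip (s.drop (st.length + 1))).drop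
           ((PySem.Chars.find (PySem.Chars.strip (s.drop (st.length + 1))) " -- ".toList).toNat + 4))))) := by
  have hslice : PySem.Chars.slice s (some (((st ++ [':']).length : Nat) : Int)) none
      = s.drop (st.length + 1) := by
    rw [PySem.Chars.slice_eq_listSlice, PySem.List.slice_from _ (by positivity)]
    simp
  simp only [pvAGo, hT, if_true, hslice]
  exact pv_payload (String.ofList st) (PySem.Chars.strip (s.drop (st.length + 1)))

theorem pv_skip (s st : List Char) (rest : List (List Char))
    (hF : PySem.Chars.startswith s (st ++ [':']) = false) :
    pvAGo s (st :: rest) = pvAGo s rest := by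
  simp [pvAGo, hF]

-- A's loop and B's trie parse agree on every (stripped) line
theorem pv_main (s : List Char) : pvAGo s pvStatuses = pvParse s := by
  unfold pvParse
  rw [pv_walk0 s, show pvStatuses = "PASS".toList :: "FAIL".toList :: "WARN".toList ::
    "INFO".toList :: "NEW".toList :: "ERR".toList :: [] from rfl]
  by_cases h1 : ("PASS".toList ++ [':']) <+: s
  · rw [if_pos h1, pv_hit s "PASS".toList _ ((PySem.Chars.startswith_iff _ _).mpr h1)]
    rfl
  have hF1 : PySem.Chars.startswith s ("PASS".toList ++ [':']) = false :=
    Bool.eq_false_iff.mpr (fun h => h1 ((PySem.Chars.startswith_iff _ _).mp h))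
  rw [if_neg h1, pv_skip s "PASS".toList _ hF1]
  by_cases h2 : ("FAIL".toList ++ [':']) <+: s
  · rw [if_pos h2]
    rw [pv_hit s "FAIL".toList _ ((PySem.Chars.startswith_iff _ _).mpr h2)]
    rfl
  have hF2 : PySem.Chars.startswith s ("FAIL".toList ++ [':']) = false :=
    Bool.eq_false_iff.mpr (fun h => h2 ((PySem.Chars.startswith_iff _ _).mp h))
  rw [if_neg h2, pv_skip s "FAIL".toList _ hF2]
  by_cases h3 : ("WARN".toList ++ [':']) <+: s
  · rw [if_pos h3]
    rw [pv_hit s "WARN".toList _ ((PySem.Chars.startswith_iff _ _).mpr h3)]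
    rfl
  have hF3 : PySem.Chars.startswith s ("WARN".toList ++ [':']) = false :=
    Bool.eq_false_iff.mpr (fun h => h3 ((PySem.Chars.startswith_iff _ _).mp h))
  rw [if_neg h3, pv_skip s "WARN".toList _ hF3]
  by_cases h4 : ("INFO".toList ++ [':']) <+: s
  · rw [if_pos h4]
    rw [pv_hit s "INFO".toList _ ((PySem.Chars.startswith_iff _ _).mpr h4)]
    rfl
  have hF4 : PySem.Chars.startswith s ("INFO".toList ++ [':']) = false :=
    Bool.eq_false_iff.mpr (fun h => h4 ((PySem.Chars.startswith_iff _ _).mp h))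
  rw [if_neg h4, pv_skip s "INFO".toList _ hF4]
  by_cases h5 : ("NEW".toList ++ [':']) <+: s
  · rw [if_pos h5]
    rw [pv_hit s "NEW".toList _ ((PySem.Chars.startswith_iff _ _).mpr h5)]
    rfl
  have hF5 : PySem.Chars.startswith s ("NEW".toList ++ [':']) = false :=
    Bool.eq_false_iff.mpr (fun h => h5 ((PySem.Chars.startswith_iff _ _).mp h))
  rw [if_neg h5, pv_skip s "NEW".toList _ hF5]
  by_cases h6 : ("ERR".toList ++ [':']) <+: s
  · rw [if_pos h6]
    rw [pv_hit s "ERR".toList _ ((PySem.Chars.startswith_iff _ _).mpr h6)]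
    rfl
  have hF6 : PySem.Chars.startswith s ("ERR".toList ++ [':']) = false :=
    Bool.eq_false_iff.mpr (fun h => h6 ((PySem.Chars.startswith_iff _ _).mp h))
  rw [if_neg h6, pv_skip s "ERR".toList _ hF6]
  rfl

-- ===== VERDICT (by name: the statement is the Claim_ definition above) =====
theorem parse_result_line_py_spec : Claim_equal_parse_result_line_py := by
  intro line _
  unfold Spec_parse_result_line_py parse_result_line_py parse_result_line_py_alt
  exact pv_main (PySem.Chars.strip line.toList)
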